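-- pv_equiv track=rewrite | github.com/chahyoungseok/Algorithm | 프로그래머스/lv2/12914. 멀리 뛰기/멀리 뛰기.py | solution
-- ===== SOURCE A (Python) =====
-- def factorial(n) :
--     result = 1
--     for i in range(1, n + 1) :
--         result *= i
--     return result
--
-- def solution(n):
--     answer = 0
--     two, one, n_range = 0, 0, n // 2
--
--     for i in range(n_range + 1) :
--         two = i
--         one = n - (two * 2)
--
--         result = int(factorial(one + two))
--         result //= factorial(one)
--         result //= factorial(two)
--         answer += result
--
--     return answer % 1234567
-- ===== SOURCE B (Python) =====
-- def solution(n):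
--     # Fibonacci DP with running modulo: ways(n) = ways(n-1) + ways(n-2).
--     if n < 0:
--         return 0
--     a, b = 1, 1
--     for _ in range(n):
--         a, b = b, (a + b) % 1234567
--     return a % 1234567
-- ===== Notes on version B (the rewrite author's own statement) =====
-- stated objective: faster
-- what changed: Replaces the sum of binomial coefficients (each computed from three factorials) by the Fibonacci recurrence with a running modulo.
import Mathlib
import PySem

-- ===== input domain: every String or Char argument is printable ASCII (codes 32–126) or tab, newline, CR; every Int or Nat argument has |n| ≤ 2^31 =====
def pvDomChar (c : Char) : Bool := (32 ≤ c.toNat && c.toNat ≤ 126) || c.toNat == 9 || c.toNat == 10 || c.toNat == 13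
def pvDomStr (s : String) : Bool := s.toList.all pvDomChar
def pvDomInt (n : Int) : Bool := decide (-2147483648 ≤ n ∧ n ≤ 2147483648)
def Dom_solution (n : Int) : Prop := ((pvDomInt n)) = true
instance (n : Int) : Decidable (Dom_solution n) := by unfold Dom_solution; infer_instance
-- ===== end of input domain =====

-- B replaces A's sum of factorial-built binomials by the Fibonacci recurrence with a running modulo (faster).

-- ===== PORT A =====
def pyFactorial (n : Int) : Int :=
  (PySem.List.pyRange 1 (n + 1) 1).foldl (fun result i => result * i) 1

-- the body of A's for-loop, one iteration: answer += fact(one+two) // fact(one) // fact(two)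
def solutionBody (n : Int) (answer i : Int) : Int :=
  let two := i
  let one := n - two * 2
  let result := pyFactorial (one + two)
  let result := PySem.Int.floordiv result (pyFactorial one)
  let result := PySem.Int.floordiv result (pyFactorial two)
  answer + result

def solution (n : Int) : Int :=
  let nRange := PySem.Int.floordiv n 2
  let answer := (PySem.List.pyRange 0 (nRange + 1) 1).foldl (solutionBody n) 0
  PySem.Int.mod answer 1234567

-- ===== PORT B =====
-- one step of B's loop: a, b = b, (a + b) % 1234567
def altStep (ab : Int × Int) (_i : Int) : Int × Int :=
  (ab.2, PySem.Int.mod (ab.1 + ab.2) 1234567)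

def solution_alt (n : Int) : Int :=
  if n < 0 then 0
  else
    let p := (PySem.List.pyRange 0 n 1).foldl altStep (1, 1)
    PySem.Int.mod p.1 1234567

-- ===== PRECONDITION & SPEC =====
def Spec_solution (n : Int) (out : Int) : Prop := out = solution_alt n
instance (n : Int) (out : Int) : Decidable (Spec_solution n out) := by unfold Spec_solution; infer_instance

-- ===== CLAIM (what is proved, stated in full; the proofs are below) =====
def Claim_equal_solution : Prop := ∀ (n : Int), Dom_solution n → Spec_solution n (solution n)

-- ===== LEMMAS AND PROOFS =====

theorem pyFactorial_natCast (k : Nat) : pyFactorial (k : Int) = ((Nat.factorial k : Nat) : Int) := by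
  induction k with
  | zero =>
      simp [pyFactorial, Nat.factorial]
  | succ k ih =>
      have h : PySem.List.pyRange 1 (((k:Int) + 1) + 1) = PySem.List.pyRange 1 ((k:Int) + 1) ++ [(k:Int) + 1] :=
        PySem.List.pyRange_one_succ_right (by omega)
      simp only [pyFactorial] at ih ⊢
      rw [show (((k+1 : Nat) : Int) + 1) = (((k:Int) + 1) + 1) from by push_cast; ring,
        h, List.foldl_append, ih]
      simp [Nat.factorial_succ]
      ring

-- one loop-body term of A adds the binomial coefficient C(N - i, i)
theorem body_eq_choose (N i : Nat) (answer : Int) (hi : i ≤ N / 2) :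
    solutionBody (N : Int) answer (i : Int) = answer + ((Nat.choose (N - i) i : Nat) : Int) := by
  have h2i : 2 * i ≤ N := by omega
  have e1 : ((N : Int) - (i : Int) * 2) + (i : Int) = ((N - i : Nat) : Int) := by
    have : (↑(N - i) : Int) = (N : Int) - (i : Int) := by omega
    omega
  have e2 : ((N : Int) - (i : Int) * 2) = ((N - 2 * i : Nat) : Int) := by
    have : (↑(N - 2 * i) : Int) = (N : Int) - 2 * (i : Int) := by omega
    omega
  simp only [solutionBody]
  rw [e1, e2, pyFactorial_natCast, pyFactorial_natCast, pyFactorial_natCast,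
    PySem.Int.floordiv_natCast, PySem.Int.floordiv_natCast]
  congr 2
  have hle : i ≤ N - i := by omega
  have key : Nat.factorial (N - i) = Nat.choose (N - i) i * Nat.factorial i * Nat.factorial (N - 2 * i) := by
    have k0 := Nat.choose_mul_factorial_mul_factorial hle
    have hsub : N - i - i = N - 2 * i := by omega
    rw [hsub] at k0
    omega
  rw [key, Nat.mul_div_cancel _ (Nat.factorial_pos _), Nat.mul_div_cancel _ (Nat.factorial_pos _)]

-- A's loop accumulates the sum of binomials
theorem a_loop_sum (N : Nat) (k : Nat) (hk : k ≤ N / 2 + 1) :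
    (PySem.List.pyRange 0 (k : Int) 1).foldl (solutionBody (N : Int)) 0
    = ((∑ i ∈ Finset.range k, Nat.choose (N - i) i : Nat) : Int) := by
  induction k with
  | zero => simp [PySem.List.pyRange_one_eq_nil (by norm_num : (0:Int) ≤ 0)]
  | succ k ih =>
      have h : PySem.List.pyRange 0 ((k:Int) + 1) = PySem.List.pyRange 0 (k:Int) ++ [(k:Int)] :=
        PySem.List.pyRange_one_succ_right (by omega)
      push_cast
      rw [h, List.foldl_append, ih (by omega), List.foldl_cons, List.foldl_nil,
        body_eq_choose N k _ (by omega), Finset.sum_range_succ]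
      push_cast
      ring

-- the sum of binomials along the shallow diagonal is a Fibonacci number
theorem sum_choose_eq_fib (N : Nat) :
    (∑ i ∈ Finset.range (N / 2 + 1), Nat.choose (N - i) i) = Nat.fib (N + 1) := by
  have key : ∑ j ∈ Finset.range (N + 1), Nat.choose (N - j) j = Nat.fib (N + 1) := by
    rw [Nat.fib_succ_eq_sum_choose, Finset.Nat.sum_antidiagonal_eq_sum_range_succ_mk,
      ← Finset.sum_range_reflect]
    apply Finset.sum_congr rfl
    intro j hj
    have hj' : j ≤ N := by simpa [Nat.lt_succ_iff] using hj
    show Nat.choose (N - (N + 1 - 1 - j)) (N + 1 - 1 - j) = Nat.choose j (N - j)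
    congr 1 <;> omega
  rw [← key]
  have hsub : Finset.range (N / 2 + 1) ⊆ Finset.range (N + 1) :=
    by intro x hx; simp only [Finset.mem_range] at hx ⊢; omega
  refine Finset.sum_subset hsub ?_
  intro i hi hni
  have h1' : i ≤ N := by simpa [Nat.lt_succ_iff] using hi
  have h2 : N / 2 + 1 ≤ i := by
    by_contra h; exact hni (Finset.mem_range.mpr (by omega))
  exact Nat.choose_eq_zero_of_lt (by omega)

theorem mod_natCast' (a : Nat) :
    PySem.Int.mod (a : Int) 1234567 = ((a % 1234567 : Nat) : Int) := by
  exact_mod_cast PySem.Int.mod_natCast a 1234567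

-- B's loop state after N steps is (fib (N+1) % m, fib (N+2) % m)
theorem b_loop_fib (N : Nat) :
    (PySem.List.pyRange 0 (N : Int) 1).foldl altStep (1, 1)
    = (((Nat.fib (N + 1) % 1234567 : Nat) : Int), ((Nat.fib (N + 2) % 1234567 : Nat) : Int)) := by
  induction N with
  | zero => simp [PySem.List.pyRange_one_eq_nil (by norm_num : (0:Int) ≤ 0)]
  | succ N ih =>
      have h : PySem.List.pyRange 0 ((N:Int) + 1) = PySem.List.pyRange 0 (N:Int) ++ [(N:Int)] :=
        PySem.List.pyRange_one_succ_right (by omega)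
      rw [show ((N+1 : Nat) : Int) = ((N:Int) + 1) from by push_cast; ring,
        h, List.foldl_append, ih, List.foldl_cons, List.foldl_nil]
      simp only [altStep, Prod.mk.injEq]
      refine ⟨by norm_cast, ?_⟩
      have e : ((Nat.fib (N + 1) % 1234567 : Nat) : Int) + ((Nat.fib (N + 2) % 1234567 : Nat) : Int)
          = ((Nat.fib (N + 1) % 1234567 + Nat.fib (N + 2) % 1234567 : Nat) : Int) := by push_cast; ring
      rw [e, mod_natCast']
      have e2 : (Nat.fib (N + 1) % 1234567 + Nat.fib (N + 2) % 1234567) % 1234567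
          = Nat.fib (N + 1 + 2) % 1234567 := by
        rw [← Nat.add_mod, Nat.fib_add_two (n := N + 1)]
      rw [e2]

theorem solution_nonneg (N : Nat) :
    solution (N : Int) = ((Nat.fib (N + 1) % 1234567 : Nat) : Int) := by
  have hfd : PySem.Int.floordiv (N : Int) 2 = ((N / 2 : Nat) : Int) := by
    exact_mod_cast PySem.Int.floordiv_natCast N 2
  have hc : PySem.Int.floordiv (N : Int) 2 + 1 = ((N / 2 + 1 : Nat) : Int) := by
    rw [hfd]; push_cast; ring
  simp only [solution, hc]
  rw [a_loop_sum N (N / 2 + 1) (le_refl _), sum_choose_eq_fib, mod_natCast']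

theorem solution_alt_nonneg (N : Nat) :
    solution_alt (N : Int) = ((Nat.fib (N + 1) % 1234567 : Nat) : Int) := by
  simp only [solution_alt]
  rw [if_neg (by omega)]
  simp only [b_loop_fib]
  rw [mod_natCast']
  norm_cast
  exact Nat.mod_mod_of_dvd _ dvd_rfl

-- ===== VERDICT (by name: the statement is the Claim_ definition above) =====
theorem solution_spec : Claim_equal_solution := by
  intro n _
  unfold Spec_solution
  rcases le_or_gt 0 n with hn | hn
  · lift n to Nat using hn
    rw [solution_nonneg, solution_alt_nonneg]
  · -- n < 0: A's loop range is empty (n // 2 + 1 ≤ 0) so A returns 0 % 1234567 = 0; B returns 0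
    have hlt : PySem.Int.floordiv n 2 < 0 := by
      rw [PySem.Int.floordiv_lt_iff_lt_mul (by norm_num : (0:Int) < 2)]; omega
    simp only [solution, solution_alt]
    rw [if_pos hn, PySem.List.pyRange_one_eq_nil (by omega : PySem.Int.floordiv n 2 + 1 ≤ 0)]
    simp
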